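-- pv_equiv track=rewrite | github.com/platformcontext/platform-context-graph | src/platform_context_graph/resolution/projection/relationships.py | _merge_import_maps
-- ===== SOURCE A (Python) =====
-- def _merge_import_maps(
--     target: dict[str, list[str]],
--     source: dict[str, list[str]],
-- ) -> dict[str, list[str]]:
--     """Merge import maps while preserving insertion order per symbol."""
--
--     for symbol, paths in source.items():
--         merged_paths = target.setdefault(symbol, [])
--         for path in paths:
--             if path not in merged_paths:
--                 merged_paths.append(path)
--     return target
-- ===== SOURCE B (Python) =====
-- def _merge_import_maps(
--     target: dict[str, list[str]],
--     source: dict[str, list[str]],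
-- ) -> dict[str, list[str]]:
--     """Merge import maps while preserving insertion order per symbol.
--
--     Built as a fresh dict in staged passes instead of mutating target while
--     scanning source: first compute the merged key order (target keys, then
--     new source keys), then build each entry in one comprehension — the
--     existing paths verbatim, followed by the new source paths deduplicated
--     via dict.fromkeys and filtered against the existing ones.
--     """
--     order = dict.fromkeys(list(target) + list(source))
--     return {
--         sym: target.get(sym, [])
--         + [p for p in dict.fromkeys(source.get(sym, []))
--            if p not in target.get(sym, [])]
--         for sym in order
--     }
-- ===== Notes on version B (the rewrite author's own statement) =====
-- stated objective: alternative
-- what changed: Instead of iterating source and mutating target per symbol with an inner membership scan, B builds a fresh dict in staged passes: it first computes the merged key order with dict.fromkeys(list(target)+list(source)), then constructs every entry in one comprehension as existing paths plus the fromkeys-deduplicated source paths filtered against them.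
import Mathlib
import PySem

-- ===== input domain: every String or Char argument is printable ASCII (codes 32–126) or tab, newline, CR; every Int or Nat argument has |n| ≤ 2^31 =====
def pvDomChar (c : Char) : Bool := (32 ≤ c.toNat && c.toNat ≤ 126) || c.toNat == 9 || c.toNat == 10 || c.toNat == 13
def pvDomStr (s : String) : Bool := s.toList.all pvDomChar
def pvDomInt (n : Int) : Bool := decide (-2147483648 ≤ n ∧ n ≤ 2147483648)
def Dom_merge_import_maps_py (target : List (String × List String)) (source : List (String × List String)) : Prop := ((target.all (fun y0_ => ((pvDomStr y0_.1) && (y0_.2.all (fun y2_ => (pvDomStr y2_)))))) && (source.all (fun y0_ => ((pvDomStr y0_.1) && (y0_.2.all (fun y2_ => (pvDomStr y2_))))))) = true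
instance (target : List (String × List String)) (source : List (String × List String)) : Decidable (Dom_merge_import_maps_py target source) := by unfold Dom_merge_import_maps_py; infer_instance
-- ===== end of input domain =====

-- B builds a FRESH dict in staged passes (merged key order first, then one comprehension per
-- entry) instead of A's fold over source that mutates target with an inner membership scan;
-- equivalence is about the RETURN value (A mutates target and its stored lists in place, B does not).

-- ===== PORT A =====
-- 'for symbol, paths in source.items(): merged_paths = target.setdefault(symbol, []);
--  for path in paths: if path not in merged_paths: merged_paths.append(path)' — the
-- setdefault-then-mutate of the stored list is ported as Dict.modify (d[k] = f(d.get(k, []))).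
def merge_import_maps_py (target : List (String × List String)) (source : List (String × List String)) : List (String × List String) :=
  ((PySem.Dict.ofList source).items.foldl
    (fun t kv =>
      PySem.Dict.modify t kv.1 []
        (fun merged_paths =>
          kv.2.foldl (fun mp path => if mp.contains path then mp else mp ++ [path]) merged_paths))
    (PySem.Dict.ofList target)).items

-- ===== PORT B =====
-- 'order = dict.fromkeys(list(target) + list(source)); return {sym: target.get(sym, []) +
--  [p for p in dict.fromkeys(source.get(sym, [])) if p not in target.get(sym, [])] for sym in order}'
def merge_import_maps_py_alt (target : List (String × List String)) (source : List (String × List String)) : List (String × List String) :=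
  let t := PySem.Dict.ofList target
  let s := PySem.Dict.ofList source
  (PySem.List.dedup (t.keys ++ s.keys)).map
    (fun sym =>
      (sym, t.getD sym [] ++
        (PySem.List.dedup (s.getD sym [])).filter (fun p => !(t.getD sym []).contains p)))

-- ===== PRECONDITION & SPEC =====
def Spec_merge_import_maps_py (target : List (String × List String)) (source : List (String × List String)) (out : List (String × List String)) : Prop := out = merge_import_maps_py_alt target source
instance (target : List (String × List String)) (source : List (String × List String)) (out : List (String × List String)) : Decidable (Spec_merge_import_maps_py target source out) := by unfold Spec_merge_import_maps_py; infer_instance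

-- ===== CLAIM (what is proved, stated in full; the proofs are below) =====
def Claim_equal_merge_import_maps_py : Prop := ∀ (target : List (String × List String)) (source : List (String × List String)), Dom_merge_import_maps_py target source → Spec_merge_import_maps_py target source (merge_import_maps_py target source)

-- ===== LEMMAS AND PROOFS =====

-- A's inner loop body is literally PySem.Set.add.
theorem innerStep_eq_setAdd :
    (fun (mp : List String) (path : String) => if mp.contains path then mp else mp ++ [path])
      = PySem.Set.add := rfl

-- Splitting the accumulator of a Set.add fold: additions already in the prefix s are skipped.
theorem foldl_add_split (paths : List String) :
    ∀ (s u : List String),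
      paths.foldl PySem.Set.add (s ++ u)
        = s ++ (paths.filter (fun p => !s.contains p)).foldl PySem.Set.add u := by
  induction paths with
  | nil => intro s u; simp
  | cons p ps ih =>
    intro s u
    by_cases hs : p ∈ s
    · have hstep : PySem.Set.add (s ++ u) p = s ++ u := by
        simp [PySem.Set.add, PySem.Set.contains, hs]
      rw [List.foldl_cons, hstep, ih s u, List.filter_cons]
      simp [hs]
    · have hstep : PySem.Set.add (s ++ u) p = s ++ PySem.Set.add u p := by
        by_cases hu : p ∈ u
        · simp [PySem.Set.add, PySem.Set.contains, hs, hu]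
        · simp [PySem.Set.add, PySem.Set.contains, hs, hu]
      rw [List.foldl_cons, hstep, ih s (PySem.Set.add u p), List.filter_cons]
      simp [hs]

-- Filtering commutes with a Set.add fold (the filter is pointwise, add keeps first occurrences).
theorem filter_foldl_add (q : String → Bool) (paths : List String) :
    ∀ (s : List String),
      (paths.foldl PySem.Set.add s).filter q = (paths.filter q).foldl PySem.Set.add (s.filter q) := by
  induction paths with
  | nil => intro s; simp
  | cons p ps ih =>
    intro s
    have hmemf : p ∈ s.filter q ↔ (p ∈ s ∧ q p = true) := by simp
    by_cases hq : q p = true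
    · have hadd : (PySem.Set.add s p).filter q = PySem.Set.add (s.filter q) p := by
        by_cases hs : p ∈ s
        · have : p ∈ s.filter q := hmemf.mpr ⟨hs, hq⟩
          simp [PySem.Set.add, PySem.Set.contains, hs, this]
        · have : p ∉ s.filter q := fun h => hs (hmemf.mp h).1
          simp [PySem.Set.add, PySem.Set.contains, hs, this, hq]
      rw [List.foldl_cons, ih (PySem.Set.add s p), hadd, List.filter_cons]
      simp [hq]
    · have hq' : q p = false := by simpa using hq
      have hadd : (PySem.Set.add s p).filter q = s.filter q := by
        by_cases hs : p ∈ s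
        · simp [PySem.Set.add, PySem.Set.contains, hs]
        · simp [PySem.Set.add, PySem.Set.contains, hs, hq']
      rw [List.foldl_cons, ih (PySem.Set.add s p), hadd, List.filter_cons]
      simp [hq']

-- The inner merge loop of A equals B's per-entry expression.
theorem inner_merge_eq (existing paths : List String) :
    paths.foldl PySem.Set.add existing
      = existing ++ (PySem.List.dedup paths).filter (fun p => !existing.contains p) := by
  have hsplit := foldl_add_split paths existing []
  have hcomm := filter_foldl_add (fun p => !existing.contains p) paths []
  simp only [List.filter_nil] at hcomm
  rw [PySem.List.dedup_eq_ofList, PySem.Set.ofList, PySem.Set.empty, hcomm, ← hsplit]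
  simp

-- In an association list with distinct keys, concatenating the values filed under sym
-- is exactly the dict lookup with default [].
theorem flatMap_filter_eq_getD (sym : String) :
    ∀ (l : List (String × List String)), (l.map Prod.fst).Nodup →
      ((l.filter (fun kv => kv.1 == sym)).flatMap (fun kv => kv.2))
        = (PySem.Dict.mk l).getD sym [] := by
  intro l
  induction l with
  | nil => intro _; simp [PySem.Dict.getD, PySem.Dict.get?]
  | cons kv rest ih =>
    obtain ⟨k, v⟩ := kv
    intro hnd
    simp only [List.map_cons, List.nodup_cons] at hnd
    by_cases h : k = sym
    · have hrest : rest.filter (fun p => p.1 == sym) = [] := by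
        apply List.filter_eq_nil_iff.mpr
        intro p hp
        simp only [beq_iff_eq]
        intro hps
        exact hnd.1 (h ▸ hps ▸ List.mem_map_of_mem hp)
      simp [h, hrest, PySem.Dict.getD, PySem.Dict.get?_mk_cons]
    · simp only [List.filter_cons, beq_iff_eq, h, if_false]
      rw [ih hnd.2]
      simp [PySem.Dict.getD, PySem.Dict.get?_mk_cons, h]

-- The value A's fold files under sym: the base value extended (via Set.add) with all
-- source paths filed under sym.
theorem getD_fold (sym : String) :
    ∀ (l : List (String × List String)) (d : PySem.Dict String (List String)),
      (l.foldl
        (fun t kv =>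
          PySem.Dict.modify t kv.1 [] (fun mp => kv.2.foldl PySem.Set.add mp)) d).getD sym []
        = ((l.filter (fun kv => kv.1 == sym)).flatMap (fun kv => kv.2)).foldl PySem.Set.add
            (d.getD sym []) := by
  intro l
  induction l with
  | nil => intro d; simp
  | cons kv rest ih =>
    intro d
    rw [List.foldl_cons, ih, List.filter_cons]
    by_cases h : kv.1 = sym
    · simp [h, List.foldl_append]
    · have : ¬ (sym = kv.1) := fun hh => h hh.symm
      simp [h, PySem.Dict.getD_modify, this]

-- ===== VERDICT (by name: the statement is the Claim_ definition above) =====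
theorem merge_import_maps_py_spec : Claim_equal_merge_import_maps_py := by
  intro target source _
  unfold Spec_merge_import_maps_py merge_import_maps_py merge_import_maps_py_alt
  simp only [innerStep_eq_setAdd]
  set t := PySem.Dict.ofList target with ht
  set s := PySem.Dict.ofList source with hs
  have hndt : t.keys.Nodup := PySem.Dict.nodup_keys_ofList target
  have hnds : s.keys.Nodup := PySem.Dict.nodup_keys_ofList source
  set D := s.items.foldl
      (fun tt kv => PySem.Dict.modify tt kv.1 [] (fun mp => kv.2.foldl PySem.Set.add mp)) t
      with hD
  have hndD : D.keys.Nodup :=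
    PySem.Dict.nodup_keys_foldl_modify_key s.items (fun kv => kv.1) []
      (fun _ kv mp => kv.2.foldl PySem.Set.add mp) t hndt
  have hkeys : D.keys = PySem.List.dedup (t.keys ++ s.keys) := by
    have h1 : D.keys = PySem.Set.update t.keys (s.items.map (fun kv => kv.1)) :=
      PySem.Dict.keys_foldl_modify_key s.items (fun kv => kv.1) []
        (fun _ kv mp => kv.2.foldl PySem.Set.add mp) t
    have h2 : s.items.map (fun kv => kv.1) = s.keys := rfl
    rw [PySem.List.dedup_eq_ofList, PySem.Set.ofList, PySem.Set.empty, List.foldl_append]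
    rw [h1, h2, PySem.Set.update]
    have h3 : List.foldl PySem.Set.add [] t.keys = t.keys := by
      have := PySem.Set.ofList_eq_self_of_nodup t.keys hndt
      simpa [PySem.Set.ofList, PySem.Set.empty] using this
    rw [h3]
  have hval : ∀ sym, D.getD sym []
      = t.getD sym [] ++
          (PySem.List.dedup (s.getD sym [])).filter (fun p => !(t.getD sym []).contains p) := by
    intro sym
    have h1 := getD_fold sym s.items t
    have h2 : ((s.items.filter (fun kv => kv.1 == sym)).flatMap (fun kv => kv.2))
        = s.getD sym [] := by
      have := flatMap_filter_eq_getD sym s.items hnds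
      simpa using this
    rw [hD, h1, h2, inner_merge_eq]
  calc D.items = D.keys.map (fun k => (k, D.getD k [])) :=
        PySem.Dict.items_eq_map_keys D hndD []
    _ = (PySem.List.dedup (t.keys ++ s.keys)).map
          (fun sym => (sym, t.getD sym [] ++
            (PySem.List.dedup (s.getD sym [])).filter (fun p => !(t.getD sym []).contains p))) := by
        rw [hkeys]
        exact List.map_congr_left (fun k _ => by rw [hval k])
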